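-- pv_equiv track=rewrite | github.com/patrykszwed/itai | DocumentClassification/main.py | get_doc_words
-- ===== SOURCE A (Python) =====
-- def is_correct_letter(letter):
--     return letter.isalpha() or letter == '\''
--
-- def get_doc_words(docs_bodies):
--     words_split = docs_bodies.split()
--     words = []
--     words_split.append(',')
--     for word in words_split:
--         new_word = ''
--         for i in range(len(word)):
--             letter = word[i]
--             if is_correct_letter(letter):
--                 new_word += letter
--         if len(new_word) > 0:
--             words.append(new_word)
--     return words
-- ===== SOURCE B (Python) =====
-- def get_doc_words(docs_bodies):
--     words = []
--     buf = ''
--     for ch in docs_bodies: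
--         if ch.isspace():
--             if buf:
--                 words.append(buf)
--                 buf = ''
--         elif ch.isalpha() or ch == "'":
--             buf += ch
--     if buf:
--         words.append(buf)
--     return words
-- ===== Notes on version B (the rewrite author's own statement) =====
-- stated objective: alternative
-- what changed: Replaces split()-then-filter-each-token (plus the appended ',' sentinel token) with a single character-level pass that maintains a word buffer, flushing it on whitespace and after the loop.
import Mathlib
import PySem

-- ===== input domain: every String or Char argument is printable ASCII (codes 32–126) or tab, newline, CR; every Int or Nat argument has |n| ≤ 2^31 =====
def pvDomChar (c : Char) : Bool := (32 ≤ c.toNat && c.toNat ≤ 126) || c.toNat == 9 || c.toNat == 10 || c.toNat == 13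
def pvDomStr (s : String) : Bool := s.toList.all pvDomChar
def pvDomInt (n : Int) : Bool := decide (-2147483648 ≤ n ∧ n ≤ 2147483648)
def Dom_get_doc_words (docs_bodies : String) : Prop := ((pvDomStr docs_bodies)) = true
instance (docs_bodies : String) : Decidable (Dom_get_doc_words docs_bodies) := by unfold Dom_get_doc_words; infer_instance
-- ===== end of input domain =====

-- B replaces split()-then-filter-each-token (with A's ',' sentinel) by one character pass with a word buffer; alternative decomposition, same cost.
set_option maxRecDepth 20000


-- ===== PORT A =====
def is_correct_letter (letter : Char) : Bool :=
  PySem.Chars.isalpha letter || letter == '\''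

def get_doc_words (docs_bodies : String) : List String :=
  let words_split := PySem.Str.split₀ docs_bodies
  let words : List String := []
  let words_split := words_split ++ [String.ofList [',']]   -- words_split.append(',')
  words_split.foldl (fun words word =>
    let new_word : List Char :=
      (PySem.List.pyRange 0 (PySem.Chars.len word.toList) 1).foldl
        (fun nw i =>
          let letter := PySem.List.pyGetD word.toList i ' '   -- word[i]; i always in range
          if is_correct_letter letter then nw ++ [letter] else nw) []
    if new_word.length > 0 then words ++ [String.ofList new_word] else words) words

-- ===== PORT B =====
def altStep (st : List String × List Char) (ch : Char) : List String × List Char :=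
  if PySem.Chars.isspace ch then
    (if st.2.isEmpty then st else (st.1 ++ [String.ofList st.2], []))
  else if PySem.Chars.isalpha ch || ch == '\'' then (st.1, st.2 ++ [ch])
  else st

def get_doc_words_alt (docs_bodies : String) : List String :=
  let st := docs_bodies.toList.foldl altStep (([] : List String), ([] : List Char))
  if st.2.isEmpty then st.1 else st.1 ++ [String.ofList st.2]

-- ===== PRECONDITION & SPEC =====
def Spec_get_doc_words (docs_bodies : String) (out : List String) : Prop := out = get_doc_words_alt docs_bodies
instance (docs_bodies : String) (out : List String) : Decidable (Spec_get_doc_words docs_bodies out) := by unfold Spec_get_doc_words; infer_instance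

-- ===== CLAIM (what is proved, stated in full; the proofs are below) =====
def Claim_equal_get_doc_words : Prop := ∀ (docs_bodies : String), Dom_get_doc_words docs_bodies → Spec_get_doc_words docs_bodies (get_doc_words docs_bodies)

-- ===== LEMMAS AND PROOFS =====

-- the letter predicate shared by both programs
def pvP (c : Char) : Bool := PySem.Chars.isalpha c || c == '\''

-- what each split₀ token contributes
def pvConv (w : List Char) : Option String :=
  if w.filter pvP = [] then none else some (String.ofList (w.filter pvP))

lemma pvConv_none {w : List Char} (h : w.filter pvP = []) : pvConv w = none := by
  unfold pvConv; rw [if_pos h]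

lemma pvConv_some {w : List Char} (h : w.filter pvP ≠ []) :
    pvConv w = some (String.ofList (w.filter pvP)) := by
  unfold pvConv; rw [if_neg h]

lemma pv_foldl_conv (ts : List (List Char)) (ws : List String) :
    ts.foldl (fun ws w => if (w.filter pvP).length > 0 then ws ++ [String.ofList (w.filter pvP)] else ws) ws
      = ws ++ ts.filterMap pvConv := by
  induction ts generalizing ws with
  | nil => simp
  | cons t ts ih =>
    by_cases h : t.filter pvP = []
    · have h0 : ¬ (t.filter pvP).length > 0 := by simp [h]
      rw [List.foldl_cons, if_neg h0, ih, List.filterMap_cons, pvConv_none h]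
    · have h0 : (t.filter pvP).length > 0 := List.length_pos_iff.mpr h
      rw [List.foldl_cons, if_pos h0, ih, List.filterMap_cons, pvConv_some h]
      simp

lemma pv_A_eq (s : String) :
    get_doc_words s = (PySem.Chars.split₀ s.toList).filterMap pvConv := by
  unfold get_doc_words
  simp only [PySem.Str.split₀]
  have hmap : (PySem.Chars.split₀ s.toList).map String.ofList ++ [String.ofList [',']]
      = ((PySem.Chars.split₀ s.toList) ++ [[',']]).map String.ofList := by simp
  rw [hmap, List.foldl_map]
  have hinner : ∀ w : List Char,
      (PySem.List.pyRange 0 (PySem.Chars.len w) 1).foldl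
        (fun nw i =>
          let letter := PySem.List.pyGetD w i ' '
          if is_correct_letter letter then nw ++ [letter] else nw) ([] : List Char)
        = w.filter pvP := by
    intro w
    rw [show PySem.Chars.len w = (w.length : Int) from rfl]
    rw [PySem.List.foldl_pyRange_pyGetD' (a := 0) (xs := w)
      (f := fun nw letter => if is_correct_letter letter then nw ++ [letter] else nw)
      (d := ' ') (init := []) (by omega)]
    simp only [Int.toNat_zero, List.drop_zero]
    rw [PySem.List.foldl_append_if_eq_filter]
    simp only [List.nil_append]
    rfl
  have hstep : (fun (ws : List String) (w : List Char) =>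
      let new_word : List Char :=
        (PySem.List.pyRange 0 (PySem.Chars.len (String.ofList w).toList) 1).foldl
          (fun nw i =>
            let letter := PySem.List.pyGetD (String.ofList w).toList i ' '
            if is_correct_letter letter then nw ++ [letter] else nw) []
      if new_word.length > 0 then ws ++ [String.ofList new_word] else ws)
      = (fun (ws : List String) (w : List Char) =>
          if (w.filter pvP).length > 0 then ws ++ [String.ofList (w.filter pvP)] else ws) := by
    funext ws w
    simp only [String.toList_ofList, hinner w]
  rw [hstep, pv_foldl_conv]
  simp only [List.nil_append, List.filterMap_append]
  have : ([[',']] : List (List Char)).filterMap pvConv = [] := by decide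
  rw [this, List.append_nil]

def pvFinish (st : List String × List Char) : List String :=
  if st.2.isEmpty then st.1 else st.1 ++ [String.ofList st.2]

lemma pv_main (cs : List Char) : ∀ (cur : List Char) (acc : List (List Char)),
    pvFinish (cs.foldl altStep (acc.reverse.filterMap pvConv, cur.reverse.filter pvP))
      = (PySem.Chars.split₀.go cs cur acc).filterMap pvConv := by
  induction cs with
  | nil =>
    intro cur acc
    cases cur with
    | nil => simp [pvFinish, PySem.Chars.split₀.go]
    | cons a l =>
      rw [List.foldl_nil, List.reverse_cons]
      rw [show PySem.Chars.split₀.go [] (a :: l) acc = ((a :: l).reverse :: acc).reverse from by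
        simp [PySem.Chars.split₀.go]]
      rw [List.reverse_cons, List.reverse_cons, List.filterMap_append]
      by_cases hf : (l.reverse ++ [a]).filter pvP = []
      · simp only [List.filterMap_cons, pvConv_none hf, List.filterMap_nil, List.append_nil]
        unfold pvFinish
        rw [if_pos (List.isEmpty_iff.mpr hf)]
      · simp only [List.filterMap_cons, pvConv_some hf, List.filterMap_nil]
        unfold pvFinish
        rw [if_neg (fun hh => hf (List.isEmpty_iff.mp hh))]
  | cons c rest ih =>
    intro cur acc
    by_cases hsp : PySem.Chars.isspace c = true
    · cases cur with
      | nil =>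
        have := ih [] acc
        simpa [altStep, hsp, PySem.Chars.split₀.go] using this
      | cons a l =>
        by_cases hf : (l.reverse ++ [a]).filter pvP = []
        · have := ih [] ((a :: l).reverse :: acc)
          rw [List.reverse_cons, List.reverse_cons, List.filterMap_append] at this
          rw [show ([(l.reverse ++ [a])] : List (List Char)).filterMap pvConv = [] from by
            simp only [List.filterMap_cons, pvConv_none hf, List.filterMap_nil]] at this
          rw [List.append_nil] at this
          simpa [altStep, hsp, hf, List.reverse_cons, PySem.Chars.split₀.go] using this
        · have := ih [] ((a :: l).reverse :: acc)
          rw [List.reverse_cons, List.reverse_cons, List.filterMap_append] at this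
          rw [show ([(l.reverse ++ [a])] : List (List Char)).filterMap pvConv
              = [String.ofList ((l.reverse ++ [a]).filter pvP)] from by
            simp only [List.filterMap_cons, pvConv_some hf, List.filterMap_nil]] at this
          rw [List.foldl_cons]
          rw [show altStep (List.filterMap pvConv acc.reverse, (a :: l).reverse.filter pvP) c
              = (List.filterMap pvConv acc.reverse
                  ++ [String.ofList ((l.reverse ++ [a]).filter pvP)], ([] : List Char)) from by
            unfold altStep
            rw [if_pos hsp, List.reverse_cons, if_neg (fun hh => hf (List.isEmpty_iff.mp hh))]]
          rw [show PySem.Chars.split₀.go (c :: rest) (a :: l) acc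
              = PySem.Chars.split₀.go rest [] ((a :: l).reverse :: acc) from by
            simp [PySem.Chars.split₀.go, hsp]]
          simpa using this
    · by_cases hp : pvP c = true
      · have := ih (c :: cur) acc
        rw [List.reverse_cons, List.filter_append,
          show ([c] : List Char).filter pvP = [c] from by simp [hp]] at this
        simpa [altStep, hsp, hp, PySem.Chars.split₀.go,
          show (PySem.Chars.isalpha c || c == '\'') = pvP c from rfl] using this
      · have := ih (c :: cur) acc
        rw [List.reverse_cons, List.filter_append,
          show ([c] : List Char).filter pvP = [] from by simp [hp],
          List.append_nil] at this
        simpa [altStep, hsp, PySem.Chars.split₀.go,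
          show (PySem.Chars.isalpha c || c == '\'') = pvP c from rfl, hp] using this

lemma pv_B_eq (s : String) :
    get_doc_words_alt s = pvFinish (s.toList.foldl altStep ([], [])) := rfl

-- ===== VERDICT (by name: the statement is the Claim_ definition above) =====
theorem get_doc_words_spec : Claim_equal_get_doc_words := by
  intro s _
  unfold Spec_get_doc_words
  rw [pv_A_eq, pv_B_eq]
  have := pv_main s.toList [] []
  simpa [PySem.Chars.split₀] using this.symm
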